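-- pv_equiv track=rewrite | github.com/msamedina/bionetverification | ec.py | f_down_finder
-- ===== SOURCE A (Python) =====
-- def f_down_finder(int_ss, universe, cut=True):
-- 	"""
-- 	Find all force-down junctions, and return their (r, c) coordinates
-- 		Input:
-- 			int_ss: array of integer subsets that may take part in the ExCov
-- 			universe: universe set defining the ExCov, as integer
-- 			cut: option to ignore all (r, c) which c > universe
-- 		Output:
-- 			rc_f_dwn: array of (r, c) coordinates of all force-down junctions
-- 	"""
-- 	rc_f_dwn = []
--
-- 	for i in int_ss[1:]:
-- 		# calculate the row
-- 		r = sum(int_ss[0:int_ss.index(i)])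
-- 		for c in range(1, r + 1, 1):
-- 			if c > universe and cut:
-- 				break
-- 			# if i & c > 0, they have common bits.
-- 			# in this case [r, c] are force down junction
-- 			if (i & c) > 0:
-- 				rc_f_dwn.append([r, c])
--
-- 	return rc_f_dwn
-- ===== SOURCE B (Python) =====
-- def f_down_finder(int_ss, universe, cut=True):
--     # Different algorithm: instead of testing i & c for every candidate c, for
--     # each row enumerate the zero-overlap values (the submasks of ~i, built
--     # ascending by doubling over set bits) and emit the gaps between them.
--     first_r = {}
--     prefix = 0
--     for x in int_ss:
--         if x not in first_r:
--             first_r[x] = prefix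
--         prefix += x
--     out = []
--     for i in int_ss[1:]:
--         r = first_r[i]
--         limit = min(r, universe) if cut else r
--         if limit >= 1:
--             m = ~i & ((1 << limit.bit_length()) - 1)
--             subs = [0]  # ascending list of all submasks of m
--             b = 1
--             while b <= m:
--                 if m & b:
--                     subs = subs + [s + b for s in subs]
--                 b <<= 1
--             prev = 0
--             for z in subs[1:]:
--                 if z > limit:
--                     break
--                 out.extend([r, c] for c in range(prev + 1, z))
--                 prev = z
--             out.extend([r, c] for c in range(prev + 1, limit + 1))
--     return out
-- ===== Notes on version B (the rewrite author's own statement) =====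
-- stated objective: alternative
-- what changed: Per row, instead of testing i & c for every candidate c, B enumerates the zero-overlap values (the submasks of ~i below the limit's bit-length, built ascending by a doubling pass over set bits) and emits the gap ranges between consecutive ones; rows come from one prefix-sum/first-occurrence pass instead of per-element index()+sum() rescans.
import Mathlib
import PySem

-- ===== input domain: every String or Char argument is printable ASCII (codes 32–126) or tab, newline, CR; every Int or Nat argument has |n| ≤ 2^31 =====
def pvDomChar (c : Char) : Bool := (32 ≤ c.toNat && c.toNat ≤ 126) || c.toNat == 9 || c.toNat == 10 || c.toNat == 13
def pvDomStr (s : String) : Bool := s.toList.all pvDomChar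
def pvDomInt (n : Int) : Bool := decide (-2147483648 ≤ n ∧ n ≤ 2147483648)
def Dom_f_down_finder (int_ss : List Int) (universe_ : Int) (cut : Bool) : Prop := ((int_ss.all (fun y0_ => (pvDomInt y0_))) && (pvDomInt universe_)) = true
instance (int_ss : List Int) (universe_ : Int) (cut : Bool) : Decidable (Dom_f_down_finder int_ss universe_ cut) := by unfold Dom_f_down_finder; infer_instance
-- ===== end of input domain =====

-- B replaces A's per-candidate bit test by a per-row enumeration of the
-- zero-overlap values (the submasks of ~i, generated in ascending order) whose
-- gaps are emitted as whole ranges; rows come from one prefix-sum pass instead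
-- of index()+sum() rescans (objective: alternative algorithm; no speed claim).

-- ===== PORT A =====
-- inner loop of A: for c in range(...): break on c > universe and cut; append [r, c] if i & c > 0
def pvInnerA (i universe_ : Int) (cut : Bool) (r : Int) : List (List Int) → List Int → List (List Int)
  | acc, [] => acc
  | acc, c :: cs =>
    if c > universe_ ∧ cut = true then acc
    else if PySem.Int.band i c > 0 then pvInnerA i universe_ cut r (acc ++ [[r, c]]) cs
    else pvInnerA i universe_ cut r acc cs

def f_down_finder (int_ss : List Int) (universe_ : Int) (cut : Bool) : List (List Int) :=
  (PySem.List.slice int_ss (some 1) none).foldl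
    (fun acc i =>
      -- r = sum(int_ss[0:int_ss.index(i)]); index cannot fail since i ∈ int_ss
      let k : Nat := (PySem.List.index? int_ss i).getD 0
      let r : Int := (PySem.List.slice int_ss (some 0) (some (k : Int))).sum
      pvInnerA i universe_ cut r acc (PySem.List.pyRange 1 (r + 1) 1))
    []

-- ===== PORT B =====
-- first pass of B: first_r as a dict value ↦ prefix sum before its first occurrence
def pvFirstR (int_ss : List Int) : Int × PySem.Dict Int Int :=
  int_ss.foldl
    (fun st x =>
      let d := if (st.2.get? x).isSome then st.2 else st.2.insert x st.1
      (st.1 + x, d))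
    (0, PySem.Dict.empty)

-- B's `subs = [0]; b = 1; while b <= m: if m & b: subs = subs + [s + b for s in subs]; b <<= 1`
-- (b = 2^k, so the loop runs for k < m.bit_length())
def pvSubmasks (m : Int) : List Int :=
  (List.range (PySem.Int.bitLength m)).foldl
    (fun subs (k : Nat) =>
      if PySem.Int.band m ((1:Int) <<< k) ≠ 0 then subs ++ subs.map (· + ((1:Int) <<< k)) else subs)
    [0]

-- B's gap-emission loop: for z in subs[1:]: break if z > limit; emit range(prev+1, z); finally range(prev+1, limit+1)
def pvGaps (r limit : Int) : List (List Int) → Int → List Int → List (List Int)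
  | acc, prev, [] => acc ++ (PySem.List.pyRange (prev + 1) (limit + 1) 1).map (fun c => [r, c])
  | acc, prev, z :: zs =>
    if z > limit then acc ++ (PySem.List.pyRange (prev + 1) (limit + 1) 1).map (fun c => [r, c])
    else pvGaps r limit (acc ++ (PySem.List.pyRange (prev + 1) z 1).map (fun c => [r, c])) z zs

def f_down_finder_alt (int_ss : List Int) (universe_ : Int) (cut : Bool) : List (List Int) :=
  let first_r := (pvFirstR int_ss).2
  (PySem.List.slice int_ss (some 1) none).foldl
    (fun acc i =>
      let r := (first_r.get? i).getD 0
      let limit := if cut then min r universe_ else r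
      if 1 ≤ limit then
        let m := PySem.Int.band (Int.not i) (((1:Int) <<< PySem.Int.bitLength limit) - 1)
        pvGaps r limit acc 0 ((pvSubmasks m).drop 1)
      else acc)
    []

-- ===== PRECONDITION & SPEC =====
def Spec_f_down_finder (int_ss : List Int) (universe_ : Int) (cut : Bool) (out : List (List Int)) : Prop := out = f_down_finder_alt int_ss universe_ cut
instance (int_ss : List Int) (universe_ : Int) (cut : Bool) (out : List (List Int)) : Decidable (Spec_f_down_finder int_ss universe_ cut out) := by unfold Spec_f_down_finder; infer_instance

-- ===== CLAIM (what is proved, stated in full; the proofs are below) =====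
def Claim_equal_f_down_finder : Prop := ∀ (int_ss : List Int) (universe_ : Int) (cut : Bool), Dom_f_down_finder int_ss universe_ cut → Spec_f_down_finder int_ss universe_ cut (f_down_finder int_ss universe_ cut)

-- ===== LEMMAS AND PROOFS =====

-- A's break-loop over range(a, a+n) collects exactly the filtered range up to the cut bound.
theorem pvInner_aux (i universe_ : Int) (cut : Bool) (r : Int) :
    ∀ (n : Nat) (a : Int) (acc : List (List Int)),
    pvInnerA i universe_ cut r acc (PySem.List.pyRange a (a + n) 1) =
      acc ++ ((PySem.List.pyRange a (if cut then min (a + n) (universe_ + 1) else a + n) 1).filter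
                (fun c => PySem.Int.band i c > 0)).map (fun c => [r, c]) := by
  intro n
  induction n with
  | zero =>
      intro a acc
      have h0 : a + ((0:Nat):Int) = a := by norm_num
      rw [h0, PySem.List.pyRange_one_eq_nil (le_refl a)]
      have h1 : PySem.List.pyRange a (if cut then min a (universe_ + 1) else a) 1 = [] := by
        split_ifs <;> exact PySem.List.pyRange_one_eq_nil (by omega)
      rw [h1]
      simp [pvInnerA]
  | succ n ih =>
      intro a acc
      have hcast : a + ((n + 1 : Nat) : Int) = a + (n : Int) + 1 := by push_cast; ring
      rw [hcast, PySem.List.pyRange_one_cons (by omega : a < a + (n : Int) + 1)]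
      by_cases hb : a > universe_ ∧ cut = true
      · have hB : PySem.List.pyRange a
            (if cut then min (a + (n : Int) + 1) (universe_ + 1) else a + (n : Int) + 1) 1 = [] := by
          rw [if_pos hb.2]
          exact PySem.List.pyRange_one_eq_nil (by omega)
        rw [hB]
        simp [pvInnerA, hb]
      · have haB : a < (if cut then min (a + (n : Int) + 1) (universe_ + 1) else a + (n : Int) + 1) := by
          split_ifs with hc
          · have : ¬ a > universe_ := fun h => hb ⟨h, hc⟩
            omega
          · omega
        rw [PySem.List.pyRange_one_cons haB]
        have hstep : a + (n : Int) + 1 = (a + 1) + (n : Int) := by ring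
        by_cases hband : PySem.Int.band i a > 0
        · simp only [pvInnerA, if_neg hb, if_pos hband]
          rw [hstep, ih (a + 1) (acc ++ [[r, a]])]
          have hB' : (if cut then min ((a + 1) + (n : Int)) (universe_ + 1) else (a + 1) + (n : Int))
              = (if cut then min (a + (n : Int) + 1) (universe_ + 1) else a + (n : Int) + 1) := by
            split_ifs <;> omega
          rw [hB']
          simp [hband]
        · simp only [pvInnerA, if_neg hb, if_neg hband]
          rw [hstep, ih (a + 1) acc]
          have hB' : (if cut then min ((a + 1) + (n : Int)) (universe_ + 1) else (a + 1) + (n : Int))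
              = (if cut then min (a + (n : Int) + 1) (universe_ + 1) else a + (n : Int) + 1) := by
            split_ifs <;> omega
          rw [hB']
          simp [hband]

theorem pvInnerA_eq (i universe_ : Int) (cut : Bool) (r : Int) (a b : Int) (acc : List (List Int)) :
    pvInnerA i universe_ cut r acc (PySem.List.pyRange a b 1) =
      acc ++ ((PySem.List.pyRange a (if cut then min b (universe_ + 1) else b) 1).filter
                (fun c => PySem.Int.band i c > 0)).map (fun c => [r, c]) := by
  by_cases hab : b ≤ a
  · rw [PySem.List.pyRange_one_eq_nil hab]
    have h1 : PySem.List.pyRange a (if cut then min b (universe_ + 1) else b) 1 = [] := by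
      split_ifs <;> exact PySem.List.pyRange_one_eq_nil (by omega)
    rw [h1]
    simp [pvInnerA]
  · have hb : b = a + ((b - a).toNat : Int) := by omega
    rw [hb]
    exact pvInner_aux i universe_ cut r (b - a).toNat a acc

-- the dict built by pvFirstR holds, under each value, the prefix sum before its first occurrence
theorem pvFirstR_get (l : List Int) :
    ∀ (p : Int) (d : PySem.Dict Int Int) (i : Int),
    ((l.foldl (fun st x =>
        let d := if (st.2.get? x).isSome then st.2 else st.2.insert x st.1
        (st.1 + x, d)) (p, d)).2.get? i) =
      match d.get? i with
      | some v => some v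
      | none => (PySem.List.index? l i).map (fun k => p + (l.take k).sum) := by
  induction l with
  | nil =>
      intro p d i
      cases hdi : d.get? i <;> simp [hdi, PySem.List.index?]
  | cons x t ih =>
      intro p d i
      rw [List.foldl_cons]
      show ((t.foldl _ (p + x, if (d.get? x).isSome then d else d.insert x p)).2.get? i) = _
      rw [ih (p + x) (if (d.get? x).isSome then d else d.insert x p) i]
      by_cases hxi : x = i
      · subst hxi
        cases hdx : d.get? x
        · simp only [Option.isSome_none, Bool.false_eq_true, ite_false]
          rw [PySem.Dict.get?_insert_self]
          rw [PySem.List.index?_cons_self]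
          simp
        · simp [hdx]
      · have hd' : (if (d.get? x).isSome then d else d.insert x p).get? i = d.get? i := by
          split_ifs
          · rfl
          · exact PySem.Dict.get?_insert_of_ne d p (fun h => hxi h.symm)
        rw [hd']
        cases hdi : d.get? i
        · simp only
          rw [PySem.List.index?_cons_of_ne t hxi]
          cases hti : PySem.List.index? t i
          · simp
          · rename_i k
            simp [List.take_succ_cons]
            ring
        · simp
theorem pvSubMask_testBit (B : Nat) : ∀ (y j : Nat), y < 2^B →
    ((2^B - 1) - y).testBit j = (decide (j < B) && !y.testBit j) := by
  induction B with
  | zero => intro y j hy; interval_cases y; simp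
  | succ B ih =>
      intro y j hy
      have hN : (2^(B+1) - 1) - y = 2 * ((2^B - 1) - y/2) + (1 - y % 2) := by
        have h1 : y = 2 * (y/2) + y % 2 := by omega
        have h2 : y / 2 < 2^B := by
          have : 2^(B+1) = 2 * 2^B := by ring
          omega
        have h3 : y % 2 < 2 := Nat.mod_lt _ (by norm_num)
        have h4 : 2^(B+1) = 2 * 2^B := by ring
        have h5 : 0 < 2^B := Nat.two_pow_pos B
        omega
      cases j with
      | zero =>
          rw [Nat.testBit_zero, Nat.testBit_zero, hN]
          have h3 : y % 2 < 2 := Nat.mod_lt _ (by norm_num)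
          have h6 : (2 * ((2^B - 1) - y/2) + (1 - y % 2)) % 2 = 1 - y % 2 := by omega
          rw [h6]
          rcases (by omega : y % 2 = 0 ∨ y % 2 = 1) with h | h <;> simp [h]
      | succ j =>
          rw [Nat.testBit_succ, Nat.testBit_succ]
          have hdiv : ((2^(B+1) - 1) - y) / 2 = (2^B - 1) - y/2 := by omega
          have h2 : y / 2 < 2^B := by
            have : 2^(B+1) = 2 * 2^B := by ring
            omega
          rw [hdiv, ih (y/2) j h2]
          simp

theorem pvTestBit_two_pow_add (k u j : Nat) (hu : u < 2^k) :
    (2^k + u).testBit j = (decide (j = k) || u.testBit j) := by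
  rcases lt_trichotomy j k with h | h | h
  · have h1 := Nat.testBit_mod_two_pow (2^k + u) k j
    rw [Nat.add_mod_left] at h1
    rw [Nat.mod_eq_of_lt hu] at h1
    simp [h1, Nat.ne_of_lt h, h]
  · subst h
    simp [Nat.testBit_two_pow_add_eq, Nat.testBit_lt_two_pow hu]
  · have h2 : 2^k + u < 2^j := by
      calc 2^k + u < 2^k + 2^k := by omega
      _ = 2^(k+1) := by ring
      _ ≤ 2^j := Nat.pow_le_pow_right (by norm_num) h
    rw [Nat.testBit_lt_two_pow h2, Nat.testBit_lt_two_pow (lt_of_lt_of_le hu (Nat.pow_le_pow_right (by norm_num) (le_of_lt h)))]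
    simp [Nat.ne_of_gt h]

-- E1: low bits see only the low mask
theorem pvAnd_low (t s ml : Nat) (hs : s < 2^t) (hml : ml < 2^t) :
    s &&& (ml + 2^t) = s &&& ml := by
  apply Nat.eq_of_testBit_eq
  intro j
  rw [Nat.testBit_and, Nat.testBit_and]
  by_cases hj : s.testBit j = true
  · have hjt : j < t := by
      by_contra hge
      have := Nat.ge_two_pow_of_testBit hj
      have : 2^t ≤ 2^j := Nat.pow_le_pow_right (by norm_num) (by omega)
      omega
    rw [add_comm ml, pvTestBit_two_pow_add t ml j hml]
    simp [Nat.ne_of_lt hjt]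
  · simp [eq_false_of_ne_true hj]

-- E3: adding the new top bit to both sides
theorem pvAnd_high (t s ml : Nat) (hs : s ≤ ml) (hml : ml < 2^t) :
    (2^t + s) &&& (2^t + ml) = 2^t + (s &&& ml) := by
  apply Nat.eq_of_testBit_eq
  intro j
  have hsml : s &&& ml < 2^t := lt_of_le_of_lt Nat.and_le_right hml
  rw [Nat.testBit_and, pvTestBit_two_pow_add t s j (by omega), pvTestBit_two_pow_add t ml j hml,
      pvTestBit_two_pow_add t (s &&& ml) j hsml]
  by_cases hj : j = t
  · simp [hj]
  · simp [hj, Nat.testBit_and]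

theorem pvNot_eq (i : Int) : Int.not i = -i - 1 := by
  cases i with
  | ofNat n => show Int.negSucc n = _ ; rw [Int.negSucc_eq] ; simp ; ring
  | negSucc n => show (n : Int) = _ ; rw [Int.negSucc_eq] ; ring

theorem pv_band_nn (a b : Int) (ha : 0 ≤ a) (hb : 0 ≤ b) :
    PySem.Int.band a b = ((a.toNat &&& b.toNat : Nat) : Int) := by
  simp [PySem.Int.band, ha, hb]

theorem pv_band_neg (a b : Int) (ha : a < 0) (hb : 0 ≤ b) :
    PySem.Int.band a b = ((b.toNat - (b.toNat &&& (-a - 1).toNat) : Nat) : Int) := by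
  simp [PySem.Int.band, not_le.mpr ha, hb]

-- KEY: for 1 ≤ c < 2^B, c is a submask of m = ~i & (2^B - 1) iff i & c == 0
theorem pvKey (i c : Int) (B : Nat) (hc1 : 1 ≤ c) (hcB : c.toNat < 2^B) :
    ((c.toNat &&& (PySem.Int.band (Int.not i) (((2^B - 1 : Nat) : Int))).toNat) = c.toNat)
    ↔ PySem.Int.band i c = 0 := by
  have hc0 : (0:Int) ≤ c := by omega
  have hBn : ∀ n : Nat, n < 2^B → ∀ j, n.testBit j = true → j < B := by
    intro n hn j hj
    by_contra hge
    have h1 := Nat.ge_two_pow_of_testBit hj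
    have h2 : 2^B ≤ 2^j := Nat.pow_le_pow_right (by norm_num) (by omega)
    omega
  by_cases hi : 0 ≤ i
  · -- m = ↑((2^B-1) - ((2^B-1) &&& i.toNat))
    have hm : PySem.Int.band (Int.not i) (((2^B - 1 : Nat) : Int))
        = (((2^B - 1) - ((2^B - 1) &&& i.toNat) : Nat) : Int) := by
      rw [pvNot_eq, pv_band_neg _ _ (by omega) (by positivity)]
      have h1 : -(-i - 1) - 1 = i := by ring
      rw [h1, Int.toNat_natCast]
    have hMc : (PySem.Int.band (Int.not i) (((2^B - 1 : Nat) : Int))).toNat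
        = (2^B - 1) - (i.toNat % 2^B) := by
      rw [hm, Int.toNat_natCast, Nat.and_comm, Nat.and_two_pow_sub_one_eq_mod]
    have hic : PySem.Int.band i c = ((i.toNat &&& c.toNat : Nat) : Int) := pv_band_nn i c hi hc0
    rw [hMc, hic]
    have hMbit : ∀ j, ((2^B - 1) - (i.toNat % 2^B)).testBit j = (decide (j < B) && !i.toNat.testBit j) := by
      intro j
      rw [pvSubMask_testBit B _ j (Nat.mod_lt _ (Nat.two_pow_pos B)), Nat.testBit_mod_two_pow]
      by_cases hj : j < B <;> simp [hj]
    constructor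
    · intro h
      have h0 : (i.toNat &&& c.toNat) = 0 := by
        apply Nat.eq_of_testBit_eq
        intro j
        rw [Nat.testBit_and, Nat.zero_testBit]
        by_cases hn : c.toNat.testBit j = true
        · have := congrArg (fun x => x.testBit j) h
          simp only [Nat.testBit_and, hMbit j, hn] at this
          simp only [Bool.true_and, Bool.and_eq_true, decide_eq_true_eq, Bool.not_eq_true'] at this
          simp [this.2]
        · simp [eq_false_of_ne_true hn]
      exact_mod_cast congrArg (fun n : Nat => (n : Int)) h0
    · intro h
      have h0 : (i.toNat &&& c.toNat) = 0 := by exact_mod_cast h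
      apply Nat.eq_of_testBit_eq
      intro j
      rw [Nat.testBit_and, hMbit j]
      by_cases hn : c.toNat.testBit j = true
      · have hjB : j < B := hBn _ hcB j hn
        have hx : i.toNat.testBit j = false := by
          have := congrArg (fun x => x.testBit j) h0
          simp only [Nat.testBit_and, Nat.zero_testBit, Bool.and_eq_false_iff] at this
          rcases this with h' | h'
          · exact h'
          · rw [hn] at h'; cases h'
        simp [hn, hjB, hx]
      · simp [eq_false_of_ne_true hn]
  · -- i < 0 : i & c = c - (c & (-i-1)); m = (-i-1) & (2^B-1)
    have hk0 : (0:Int) ≤ -i - 1 := by omega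
    have hm : PySem.Int.band (Int.not i) (((2^B - 1 : Nat) : Int))
        = (((-i - 1).toNat &&& (2^B - 1) : Nat) : Int) := by
      rw [pvNot_eq, pv_band_nn _ _ hk0 (by positivity)]
      rw [Int.toNat_natCast]
    have hic : PySem.Int.band i c = ((c.toNat - (c.toNat &&& (-i - 1).toNat) : Nat) : Int) :=
      pv_band_neg i c (by omega) hc0
    set k := (-i - 1).toNat with hkdef
    have hic0 : (PySem.Int.band i c = 0) ↔ (c.toNat &&& k = c.toNat) := by
      rw [hic]
      have hle : c.toNat &&& k ≤ c.toNat := Nat.and_le_left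
      constructor
      · intro h
        have : c.toNat - (c.toNat &&& k) = 0 := by exact_mod_cast h
        omega
      · intro h
        rw [h]
        simp
    rw [hic0, hm, Int.toNat_natCast]
    constructor
    · intro h
      apply Nat.eq_of_testBit_eq
      intro j
      rw [Nat.testBit_and]
      by_cases hn : c.toNat.testBit j = true
      · have := congrArg (fun x => x.testBit j) h
        simp only [Nat.testBit_and, hn, Bool.true_and] at this
        rw [hn]
        simp at this ⊢
        exact this.1
      · simp [eq_false_of_ne_true hn]
    · intro h
      apply Nat.eq_of_testBit_eq
      intro j
      rw [Nat.testBit_and, Nat.testBit_and]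
      by_cases hn : c.toNat.testBit j = true
      · have hjB : j < B := hBn _ hcB j hn
        have hkj : k.testBit j = true := by
          have := congrArg (fun x => x.testBit j) h
          simp only [Nat.testBit_and, hn, Bool.true_and] at this
          exact this
        simp [hn, hkj, Nat.testBit_two_pow_sub_one, hjB]
      · simp [eq_false_of_ne_true hn]

theorem pvOneShift (k : Nat) : ((1:Int) <<< k) = ((2^k : Nat) : Int) := by
  simp [Int.shiftLeft_eq]

-- one doubling step of the submask list, on the filtered-range characterization
theorem pvFilter_step (t ml : Nat) (hml : ml < 2^t) :
    (List.range ((ml + 2^t) + 1)).filter (fun s => s &&& (ml + 2^t) = s)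
    = (List.range (ml+1)).filter (fun s => s &&& ml = s)
      ++ ((List.range (ml+1)).filter (fun s => s &&& ml = s)).map (fun s => 2^t + s) := by
  have h1 : (ml + 2^t) + 1 = 2^t + (ml+1) := by ring
  rw [h1, List.range_add, List.filter_append, List.filter_map]
  congr 1
  · -- low part
    have h2 : (List.range (2^t)).filter (fun s => decide (s &&& (ml + 2^t) = s))
        = (List.range (2^t)).filter (fun s => decide (s &&& ml = s)) := by
      apply List.filter_congr
      intro s hs
      rw [List.mem_range] at hs
      rw [pvAnd_low t s ml hs hml]
    rw [h2]
    have h3 : 2^t = (ml + 1) + (2^t - (ml+1)) := by omega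
    rw [h3, List.range_add, List.filter_append]
    have h4 : (List.map (fun x => ml + 1 + x) (List.range (2^t - (ml+1)))).filter
        (fun s => decide (s &&& ml = s)) = [] := by
      rw [List.filter_eq_nil_iff]
      intro s hs
      rw [List.mem_map] at hs
      obtain ⟨x, _, hx⟩ := hs
      have : s &&& ml ≤ ml := Nat.and_le_right
      simp only [decide_eq_true_eq]
      omega
    rw [h4, List.append_nil]
  · apply congrArg
    apply List.filter_congr
    intro s hs
    rw [List.mem_range] at hs
    simp only [Function.comp]
    have h5 : (2^t + s) &&& (ml + 2^t) = 2^t + (s &&& ml) := by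
      rw [add_comm ml (2^t)]
      exact pvAnd_high t s ml (by omega) hml
    rw [h5]
    simp only [decide_eq_decide]
    omega

def pvSubStep (m : Int) (subs : List Int) (k : Nat) : List Int :=
  if PySem.Int.band m ((1:Int) <<< k) ≠ 0 then subs ++ subs.map (· + ((1:Int) <<< k)) else subs

theorem pvSubmasks_inv (m : Int) (hm : 0 ≤ m) : ∀ t : Nat,
    (List.range t).foldl (pvSubStep m) [0]
      = ((List.range ((m.toNat % 2^t) + 1)).filter
          (fun s => s &&& (m.toNat % 2^t) = s)).map (fun s => Int.ofNat s) := by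
  intro t
  induction t with
  | zero =>
      simp only [pow_zero, Nat.mod_one]
      rfl
  | succ t ih =>
      rw [List.range_succ, List.foldl_append, List.foldl_cons, List.foldl_nil, ih]
      have hml : m.toNat % 2^t < 2^t := Nat.mod_lt _ (Nat.two_pow_pos t)
      have hband : PySem.Int.band m ((1:Int) <<< t) = (((m.toNat.testBit t).toNat * 2^t : Nat) : Int) := by
        rw [pvOneShift, pv_band_nn m _ hm (by positivity), Int.toNat_natCast, Nat.and_two_pow]
      have hmod : m.toNat % 2^(t+1) = m.toNat % 2^t + 2^t * (m.toNat.testBit t).toNat := by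
        rw [Nat.mod_pow_succ, Nat.toNat_testBit]
      cases hbit : m.toNat.testBit t with
      | false =>
          rw [pvSubStep, if_neg (by rw [hband, hbit]; simp)]
          rw [hmod, hbit]
          simp
      | true =>
          rw [pvSubStep, if_pos (by rw [hband, hbit]; simp)]
          rw [hmod, hbit]
          simp only [Bool.toNat_true, mul_one]
          rw [pvFilter_step t (m.toNat % 2^t) hml]
          rw [List.map_append]
          congr 1
          rw [List.map_map, List.map_map]
          apply List.map_congr_left
          intro s hs
          simp only [Function.comp_apply, pvOneShift, Int.ofNat_eq_natCast]
          push_cast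
          ring

def pvSubmasksT (m : Int) : List Int :=
  (List.range (PySem.Int.bitLength m)).foldl (pvSubStep m) [0]

theorem pvSubmasksT_eq (m : Int) (hm : 0 ≤ m) :
    pvSubmasksT m = ((List.range (m.toNat + 1)).filter
      (fun s => s &&& m.toNat = s)).map (fun s => Int.ofNat s) := by
  have h1 := pvSubmasks_inv m hm (PySem.Int.bitLength m)
  have h2 : m.toNat < 2 ^ PySem.Int.bitLength m := by
    have := PySem.Int.lt_two_pow_bitLength m
    omega
  rw [pvSubmasksT, h1, Nat.mod_eq_of_lt h2]

theorem pvGaps_eq (r limit : Int) (Q : Int → Prop) [DecidablePred Q] :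
    ∀ (zs : List Int) (prev : Int) (acc : List (List Int)),
    zs.Pairwise (· < ·) → (∀ z ∈ zs, prev < z) →
    (∀ c, prev < c → c ≤ limit → (Q c ↔ c ∈ zs)) →
    pvGaps r limit acc prev zs =
      acc ++ ((PySem.List.pyRange (prev + 1) (limit + 1) 1).filter
                (fun c => ¬ Q c)).map (fun c => [r, c]) := by
  intro zs
  induction zs with
  | nil =>
      intro prev acc _ _ hQ
      rw [pvGaps]
      congr 2
      rw [List.filter_eq_self.mpr]
      intro c hc
      rw [PySem.List.mem_pyRange_one] at hc
      simp only [decide_eq_true_eq]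
      intro hQc
      exact absurd ((hQ c (by omega) (by omega)).mp hQc) (List.not_mem_nil)
  | cons z zs ih =>
      intro prev acc hpw hgt hQ
      rw [List.pairwise_cons] at hpw
      by_cases hz : z > limit
      · rw [pvGaps, if_pos hz]
        congr 2
        rw [List.filter_eq_self.mpr]
        intro c hc
        rw [PySem.List.mem_pyRange_one] at hc
        simp only [decide_eq_true_eq]
        intro hQc
        rcases List.mem_cons.mp ((hQ c (by omega) (by omega)).mp hQc) with h | h
        · omega
        · have := hpw.1 c h
          omega
      · rw [pvGaps, if_neg hz]
        have hprevz : prev < z := hgt z List.mem_cons_self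
        have hQ' : ∀ c, z < c → c ≤ limit → (Q c ↔ c ∈ zs) := by
          intro c hc1 hc2
          rw [hQ c (by omega) hc2, List.mem_cons]
          constructor
          · rintro (h | h)
            · omega
            · exact h
          · intro h
            exact Or.inr h
        rw [ih z (acc ++ (PySem.List.pyRange (prev + 1) z 1).map (fun c => [r, c])) hpw.2
              (fun z' hz' => hpw.1 z' hz') hQ']
        rw [List.append_assoc]
        congr 1
        rw [PySem.List.pyRange_one_append (prev+1) (z+1) (limit+1) (by omega) (by omega),
            PySem.List.pyRange_one_append (prev+1) z (z+1) (by omega) (by omega),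
            PySem.List.pyRange_one_cons (by omega : z < z + 1),
            PySem.List.pyRange_one_eq_nil (by omega : (z:Int) + 1 ≤ z + 1)]
        rw [List.append_assoc, List.filter_append, List.map_append]
        congr 1
        · rw [List.filter_eq_self.mpr]
          intro c hc
          rw [PySem.List.mem_pyRange_one] at hc
          simp only [decide_eq_true_eq]
          intro hQc
          rcases List.mem_cons.mp ((hQ c (by omega) (by omega)).mp hQc) with h | h
          · omega
          · have := hpw.1 c h
            omega
        · have hQz : Q z := (hQ z hprevz (by omega)).mpr List.mem_cons_self
          simp [hQz]



theorem pvZs_eq (m : Int) (hm : 0 ≤ m) :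
    (pvSubmasks m).drop 1
      = (((List.range m.toNat).map Nat.succ).filter
          (fun s => s &&& m.toNat = s)).map (fun s => Int.ofNat s) := by
  have h0 : pvSubmasks m = pvSubmasksT m := by
    unfold pvSubmasks pvSubmasksT
    congr 1
  rw [h0, pvSubmasksT_eq m hm, List.range_succ_eq_map, List.filter_cons]
  rw [if_pos (by simp)]
  simp only [List.map_cons, List.drop_succ_cons, List.drop_zero]

theorem pvZs_pairwise (m : Int) (hm : 0 ≤ m) :
    ((pvSubmasks m).drop 1).Pairwise (· < ·) := by
  rw [pvZs_eq m hm]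
  apply List.pairwise_map.mpr
  apply List.Pairwise.filter
  apply List.pairwise_map.mpr
  apply (List.pairwise_lt_range).imp
  intro a b h
  simp only [Int.ofNat_eq_natCast]
  omega

theorem pvZs_pos (m : Int) (hm : 0 ≤ m) : ∀ z ∈ (pvSubmasks m).drop 1, 0 < z := by
  rw [pvZs_eq m hm]
  intro z hz
  rw [List.mem_map] at hz
  obtain ⟨s, hs, rfl⟩ := hz
  have h2 := List.mem_filter.mp hs
  rcases List.mem_map.mp h2.1 with ⟨x, _, rfl⟩
  simp only [Int.ofNat_eq_natCast]
  omega

theorem pvZs_mem (m : Int) (hm : 0 ≤ m) (c : Int) (hc : 0 < c) :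
    c ∈ (pvSubmasks m).drop 1 ↔ c.toNat &&& m.toNat = c.toNat := by
  rw [pvZs_eq m hm, List.mem_map]
  constructor
  · rintro ⟨s, hs, rfl⟩
    have h2 := List.mem_filter.mp hs
    simpa using h2.2
  · intro h
    refine ⟨c.toNat, ?_, by simp [Int.ofNat_eq_natCast]; omega⟩
    rw [List.mem_filter]
    constructor
    · rw [List.mem_map]
      have hle : c.toNat ≤ m.toNat := by
        have := Nat.and_le_right (n := c.toNat) (m := m.toNat)
        omega
      exact ⟨c.toNat - 1, by rw [List.mem_range]; omega, by omega⟩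
    · simpa using h

-- ===== VERDICT (by name: the statement is the Claim_ definition above) =====
theorem f_down_finder_spec : Claim_equal_f_down_finder := by
  intro int_ss universe_ cut _
  unfold Spec_f_down_finder f_down_finder f_down_finder_alt
  apply PySem.List.foldl_congr_mem
  intro acc i hi
  have hmem : i ∈ int_ss := PySem.List.mem_of_mem_slice int_ss (some 1) none hi
  obtain ⟨k0, hk0⟩ := Option.isSome_iff_exists.mp ((PySem.List.index?_isSome_iff int_ss i).mpr hmem)
  have hrB : ((pvFirstR int_ss).2.get? i).getD 0 = (int_ss.take k0).sum := by
    unfold pvFirstR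
    rw [pvFirstR_get int_ss 0 PySem.Dict.empty i, PySem.Dict.get?_empty, hk0]
    simp
  have hrA : (PySem.List.slice int_ss (some 0)
      (some (((PySem.List.index? int_ss i).getD 0 : Nat) : Int))).sum = (int_ss.take k0).sum := by
    rw [hk0]
    simp [PySem.List.slice_to_natCast]
  rw [pvInnerA_eq]
  rw [hrA, hrB]
  set r := (int_ss.take k0).sum with hrdef
  have hbound : (if cut then min (r + 1) (universe_ + 1) else r + 1)
      = ((if cut then min r universe_ else r) + 1) := by
    split_ifs <;> omega
  rw [hbound]
  set L := (if cut then min r universe_ else r) with hLdef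
  by_cases hlim : 1 ≤ L
  · rw [if_pos hlim]
    set B := PySem.Int.bitLength L with hBdef
    have h2B : (1:Nat) ≤ 2^B := Nat.one_le_two_pow
    have hmask : ((1:Int) <<< B) - 1 = ((2^B - 1 : Nat) : Int) := by
      rw [pvOneShift, Nat.cast_sub h2B, Nat.cast_one]
    set m := PySem.Int.band (Int.not i) (((1:Int) <<< B) - 1) with hmdef
    have hm2 : m = PySem.Int.band (Int.not i) (((2^B - 1 : Nat) : Int)) := by
      rw [hmdef, hmask]
    have hm0 : 0 ≤ m := by
      rw [hm2, PySem.Int.band_comm]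
      exact PySem.Int.band_nonneg_of_nonneg_left _ (by positivity)
    rw [pvGaps_eq r L (fun c => c ∈ (pvSubmasks m).drop 1) ((pvSubmasks m).drop 1) 0 acc
          (pvZs_pairwise m hm0) (pvZs_pos m hm0) (fun c _ _ => Iff.rfl)]
    congr 1
    apply congrArg
    apply List.filter_congr
    intro c hcmem
    rw [PySem.List.mem_pyRange_one] at hcmem
    have hLB : L.natAbs < 2^B := PySem.Int.lt_two_pow_bitLength L
    have hcB : c.toNat < 2^B := by omega
    have hkey := pvKey i c B (by omega) hcB
    rw [← hm2] at hkey
    have hz := pvZs_mem m hm0 c (by omega)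
    have hnn : 0 ≤ PySem.Int.band i c := by
      rw [PySem.Int.band_comm]
      exact PySem.Int.band_nonneg_of_nonneg_left i (by omega)
    simp only [decide_eq_decide]
    rw [hz]
    have h0 : PySem.Int.band i c > 0 ↔ ¬ PySem.Int.band i c = 0 := by omega
    rw [h0]
    exact not_congr hkey.symm
  · rw [if_neg hlim]
    rw [PySem.List.pyRange_one_eq_nil (by omega : L + 1 ≤ 1)]
    simp
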